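-- pv_equiv track=rewrite | github.com/aylnakyz/TFM_2025 | 1.preprocessing.py | sliding_window_counts
-- ===== SOURCE A (Python) =====
-- from collections import Counter
--
-- CODES = ['TI', 'REF', 'UI', 'FAM', 'ACT', 'InF']
--
-- def sliding_window_counts(code_counts, window_size):
--     results = []
--     for i in range(0, len(code_counts) - window_size + 1):
--         window = code_counts[i:i + window_size]
--         combined = Counter()
--         for c in window:
--             combined.update(c)
--         row = {code: combined.get(code, 0) for code in CODES}
--         row['window_index'] = i
--         results.append(row)
--     return results
-- ===== SOURCE B (Python) =====
-- CODES = ['TI', 'REF', 'UI', 'FAM', 'ACT', 'InF']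
--
-- def sliding_window_counts(code_counts, window_size):
--     m = len(CODES)
--     pref = [[0] * m]               # pref[k][j] = total of CODES[j] over the first k dicts
--     for d in code_counts:
--         last = pref[-1]
--         pref.append([last[j] + d.get(CODES[j], 0) for j in range(m)])
--     results = []
--     for i in range(len(code_counts) - window_size + 1):
--         lo, hi = pref[i], pref[i + window_size]
--         row = {CODES[j]: hi[j] - lo[j] for j in range(m)}
--         row['window_index'] = i
--         results.append(row)
--     return results
-- ===== Notes on version B (the rewrite author's own statement) =====
-- stated objective: alternative
-- what changed: A recounts every window from scratch (slice + Counter over window_size dicts per output row); B builds per-code prefix-sum vectors in one pass and emits each row as the difference pref[i+w]-pref[i]. Pre_ excludes negative window sizes (outside the natural domain of a window size), where A returns rows of zeros from empty slices but B's prefix indexing raises IndexError.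
import Mathlib
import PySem

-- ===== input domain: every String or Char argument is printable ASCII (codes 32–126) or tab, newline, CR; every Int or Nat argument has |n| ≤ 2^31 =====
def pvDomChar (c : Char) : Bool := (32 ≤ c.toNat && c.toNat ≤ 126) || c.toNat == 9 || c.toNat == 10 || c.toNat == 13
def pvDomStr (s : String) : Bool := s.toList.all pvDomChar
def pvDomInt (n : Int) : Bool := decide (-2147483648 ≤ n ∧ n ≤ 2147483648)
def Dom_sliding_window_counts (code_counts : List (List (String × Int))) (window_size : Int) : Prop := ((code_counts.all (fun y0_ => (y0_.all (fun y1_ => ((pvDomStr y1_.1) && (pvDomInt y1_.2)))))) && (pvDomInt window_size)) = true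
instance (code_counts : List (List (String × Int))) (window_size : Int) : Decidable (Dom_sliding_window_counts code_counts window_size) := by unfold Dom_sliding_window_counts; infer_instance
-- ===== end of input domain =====

-- B replaces A's per-window recount (slice + Counter over every window) by one prefix-sum pass
-- and a difference of two prefix vectors per window: an alternative algorithm, same results on
-- nonnegative window sizes (Pre_ states the domain).


-- ===== PORT A =====
def pvCODES : List String := ["TI", "REF", "UI", "FAM", "ACT", "InF"]

-- combined.update(c): add each (key, value) item of the dict c into the Counter
def pvCounterUpdate (comb : PySem.Dict String Int) (c : List (String × Int)) : PySem.Dict String Int :=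
  c.foldl (fun comb2 kv => comb2.insert kv.1 (comb2.getD kv.1 0 + kv.2)) comb

-- the body of A's main loop: window slice, Counter over it, row dict
def pvRowA (code_counts : List (List (String × Int))) (window_size : Int) (i : Int) :
    List (String × Int) :=
  let window := PySem.List.slice code_counts (some i) (some (i + window_size))
  let combined := window.foldl pvCounterUpdate (PySem.Dict.mk [])
  let row := pvCODES.foldl (fun row code => row.insert code (combined.getD code 0)) (PySem.Dict.mk [])
  (row.insert "window_index" i).items

def sliding_window_counts (code_counts : List (List (String × Int))) (window_size : Int) : List (List (String × Int)) :=
  (PySem.List.pyRange 0 ((code_counts.length : Int) - window_size + 1) 1).foldl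
    (fun results i => results ++ [pvRowA code_counts window_size i]) []

-- ===== PORT B =====
-- [last[j] + d.get(CODES[j], 0) for j in range(m)]   (m = len(CODES) = 6)
def pvStep (last : List Int) (d : List (String × Int)) : List Int :=
  (PySem.List.pyRange 0 6 1).map (fun j =>
    PySem.List.pyGetD last j 0 + (PySem.Dict.mk d).getD (PySem.List.pyGetD pvCODES j "") 0)

-- the body of B's result loop: row i is the difference pref[i+window_size] - pref[i]
def pvRowB (pref : List (List Int)) (window_size : Int) (i : Int) :
    List (String × Int) :=
  let lo := PySem.List.pyGetD pref i []
  let hi := PySem.List.pyGetD pref (i + window_size) []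
  let row := (PySem.List.pyRange 0 6 1).foldl
    (fun row j => PySem.Dict.insert row (PySem.List.pyGetD pvCODES j "")
      (PySem.List.pyGetD hi j 0 - PySem.List.pyGetD lo j 0)) (PySem.Dict.mk [])
  (row.insert "window_index" i).items

def sliding_window_counts_alt (code_counts : List (List (String × Int))) (window_size : Int) : List (List (String × Int)) :=
  let zero : List Int := List.replicate 6 0
  -- pref[-1] is the last appended vector: carried as the second state component
  let st := code_counts.foldl
    (fun (st : List (List Int) × List Int) d => (st.1 ++ [pvStep st.2 d], pvStep st.2 d))
    ([zero], zero)
  (PySem.List.pyRange 0 ((code_counts.length : Int) - window_size + 1) 1).foldl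
    (fun results i => results ++ [pvRowB st.1 window_size i]) []

-- ===== PRECONDITION & SPEC =====
-- Pre_ requires a nonnegative window size (the natural domain of a window size: on negative
-- sizes A's rows of zeros come from empty slices while B raises IndexError), and excludes
-- association lists with a duplicated key inside one inner list: those encode no Python dict
-- (dict keys are unique), so no Python input is excluded by that conjunct.
def Pre_sliding_window_counts (code_counts : List (List (String × Int))) (window_size : Int) : Prop :=
  0 ≤ window_size ∧ ∀ d ∈ code_counts, (d.map Prod.fst).Nodup
instance (code_counts : List (List (String × Int))) (window_size : Int) : Decidable (Pre_sliding_window_counts code_counts window_size) := by unfold Pre_sliding_window_counts; infer_instance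
def pvWitness_sliding_window_counts : (List (List (String × Int))) × Int :=
  ([[("TI", 2), ("ACT", 1)], [("REF", 3)], []], 2)

def Spec_sliding_window_counts (code_counts : List (List (String × Int))) (window_size : Int) (out : List (List (String × Int))) : Prop := out = sliding_window_counts_alt code_counts window_size
instance (code_counts : List (List (String × Int))) (window_size : Int) (out : List (List (String × Int))) : Decidable (Spec_sliding_window_counts code_counts window_size out) := by unfold Spec_sliding_window_counts; infer_instance

-- ===== CLAIM (what is proved, stated in full; the proofs are below) =====
def Claim_equal_sliding_window_counts : Prop := ∀ (code_counts : List (List (String × Int))) (window_size : Int), Dom_sliding_window_counts code_counts window_size → Pre_sliding_window_counts code_counts window_size → Spec_sliding_window_counts code_counts window_size (sliding_window_counts code_counts window_size)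

-- ===== LEMMAS AND PROOFS =====

-- sum of the values carried by key `code` among the items of c
def pvPairSum (c : List (String × Int)) (code : String) : Int :=
  (c.map (fun kv => if kv.1 = code then kv.2 else 0)).sum

-- column sum: total count of `code` over a list of dicts
def pvColSum (ds : List (List (String × Int))) (code : String) : Int :=
  (ds.map (fun d => (PySem.Dict.mk d).getD code 0)).sum

theorem pvCounterUpdate_getD (c : List (String × Int)) (comb : PySem.Dict String Int)
    (code : String) :
    (pvCounterUpdate comb c).getD code 0 = comb.getD code 0 + pvPairSum c code := by
  induction c generalizing comb with
  | nil => simp [pvCounterUpdate, pvPairSum]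
  | cons kv c ih =>
    rw [show pvCounterUpdate comb (kv :: c)
          = pvCounterUpdate (comb.insert kv.1 (comb.getD kv.1 0 + kv.2)) c from rfl, ih]
    by_cases h : kv.1 = code
    · subst h
      rw [PySem.Dict.getD_insert_self]
      simp [pvPairSum]; ring
    · rw [PySem.Dict.getD_insert_of_ne _ _ _ (fun hh => h hh.symm)]
      simp [pvPairSum, h]

theorem pvPairSum_eq_getD (c : List (String × Int)) (code : String)
    (h : (c.map Prod.fst).Nodup) :
    pvPairSum c code = (PySem.Dict.mk c).getD code 0 := by
  induction c with
  | nil => simp [pvPairSum, PySem.Dict.getD, PySem.Dict.get?]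
  | cons kv c ih =>
    simp only [List.map_cons, List.nodup_cons] at h
    by_cases hk : kv.1 = code
    · subst hk
      have hz : pvPairSum c kv.1 = 0 := by
        apply List.sum_eq_zero
        intro x hx
        simp only [List.mem_map] at hx
        obtain ⟨p, hp, rfl⟩ := hx
        have : p.1 ≠ kv.1 := fun he => h.1 (he ▸ List.mem_map_of_mem hp)
        simp [this]
      have hcons : pvPairSum (kv :: c) kv.1 = kv.2 + pvPairSum c kv.1 := by simp [pvPairSum]
      rw [hcons, hz]
      simp [PySem.Dict.getD, PySem.Dict.get?]
    · rw [show pvPairSum (kv :: c) code = (if kv.1 = code then kv.2 else 0) + pvPairSum c code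
            from by simp [pvPairSum]]
      rw [ih h.2]
      simp [PySem.Dict.getD, PySem.Dict.get?, hk]

theorem pvFoldUpdate_getD (ws : List (List (String × Int))) (comb : PySem.Dict String Int)
    (code : String) :
    (ws.foldl pvCounterUpdate comb).getD code 0
      = comb.getD code 0 + (ws.map (fun c => pvPairSum c code)).sum := by
  induction ws generalizing comb with
  | nil => simp
  | cons c ws ih =>
    rw [show (c :: ws).foldl pvCounterUpdate comb = ws.foldl pvCounterUpdate (pvCounterUpdate comb c)
          from rfl, ih, pvCounterUpdate_getD]
    simp; ring

-- the prefix vectors B's first loop produces, written as structural recursion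
def pvPrefs (lst : List Int) : List (List (String × Int)) → List (List Int)
  | [] => []
  | d :: ds => pvStep lst d :: pvPrefs (pvStep lst d) ds

def pvIter (lst : List Int) (ds : List (List (String × Int))) : List Int :=
  ds.foldl pvStep lst

theorem pvFold_prefix (ds : List (List (String × Int))) (acc : List (List Int)) (lst : List Int) :
    ds.foldl (fun (st : List (List Int) × List Int) d => (st.1 ++ [pvStep st.2 d], pvStep st.2 d))
      (acc, lst) = (acc ++ pvPrefs lst ds, pvIter lst ds) := by
  induction ds generalizing acc lst with
  | nil => simp [pvPrefs, pvIter]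
  | cons d ds ih =>
    rw [List.foldl_cons, ih]
    simp [pvPrefs, pvIter]

theorem pvPrefs_getD (ds : List (List (String × Int))) (lst : List Int) (k : Nat)
    (hk : k ≤ ds.length) :
    (lst :: pvPrefs lst ds).getD k [] = pvIter lst (ds.take k) := by
  induction ds generalizing lst k with
  | nil =>
    have hk0 : k = 0 := by simpa using hk
    subst hk0
    simp [pvPrefs, pvIter]
  | cons d ds ih =>
    cases k with
    | zero => simp [pvIter]
    | succ k =>
      rw [show (lst :: pvPrefs lst (d :: ds)).getD (k + 1) []
            = (pvStep lst d :: pvPrefs (pvStep lst d) ds).getD k [] from rfl]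
      rw [ih (pvStep lst d) k (by simpa using hk)]
      rfl

theorem pvStep_map (base : String → Int) (d : List (String × Int)) :
    pvStep (pvCODES.map base) d
      = pvCODES.map (fun code => base code + (PySem.Dict.mk d).getD code 0) := by
  rfl

theorem pvIter_map (ds : List (List (String × Int))) (base : String → Int) :
    pvIter (pvCODES.map base) ds = pvCODES.map (fun code => base code + pvColSum ds code) := by
  induction ds generalizing base with
  | nil => simp [pvIter, pvColSum]
  | cons d ds ih =>
    rw [show pvIter (pvCODES.map base) (d :: ds) = pvIter (pvStep (pvCODES.map base) d) ds from rfl,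
        pvStep_map, ih]
    refine List.map_congr_left (fun c _ => ?_)
    simp [pvColSum]; ring

theorem pvIter_zero (ds : List (List (String × Int))) :
    pvIter (List.replicate 6 0) ds = pvCODES.map (fun code => pvColSum ds code) := by
  rw [show (List.replicate 6 (0 : Int)) = pvCODES.map (fun _ => 0) from rfl, pvIter_map]
  simp

theorem pvRow_eq (cc : List (List (String × Int))) (w i : Int)
    (hpre : ∀ d ∈ cc, (d.map Prod.fst).Nodup)
    (hw : 0 ≤ w) (hi : 0 ≤ i) (hiw : i + w ≤ (cc.length : Int)) :
    pvRowA cc w i = pvRowB (List.replicate 6 0 :: pvPrefs (List.replicate 6 0) cc) w i := by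
  have ha : i.toNat ≤ cc.length := by omega
  have hb : (i + w).toNat ≤ cc.length := by omega
  have hab : i.toNat ≤ (i + w).toNat := by omega
  set a := i.toNat with ha_def
  set b := (i + w).toNat with hb_def
  have hwin : PySem.List.slice cc (some i) (some (i + w)) = (cc.drop a).take (b - a) := by
    have := PySem.List.slice_of_nonneg (xs := cc) (a := i) (b := i + w) hi (by omega) (by omega) hiw
    simpa using this
  have hcomb : ∀ code : String,
      ((PySem.List.slice cc (some i) (some (i + w))).foldl pvCounterUpdate (PySem.Dict.mk [])).getD code 0
        = pvColSum (cc.take b) code - pvColSum (cc.take a) code := by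
    intro code
    rw [hwin, pvFoldUpdate_getD]
    have h1 : ∀ c ∈ (cc.drop a).take (b - a), pvPairSum c code = (PySem.Dict.mk c).getD code 0 :=
      fun c hc => pvPairSum_eq_getD c code (hpre c (List.mem_of_mem_drop (List.mem_of_mem_take hc)))
    rw [List.map_congr_left h1]
    have hsplit : cc.take b = cc.take a ++ (cc.drop a).take (b - a) := by
      rw [← List.take_add]
      congr 1
      omega
    rw [show pvColSum (cc.take b) code
          = pvColSum (cc.take a) code + pvColSum ((cc.drop a).take (b - a)) code from by
        rw [hsplit]; simp [pvColSum]]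
    rw [show (PySem.Dict.mk ([] : List (String × Int))).getD code 0 = 0 from rfl]
    unfold pvColSum
    ring
  have hpref : ∀ k : Nat, k ≤ cc.length →
      (List.replicate 6 0 :: pvPrefs (List.replicate 6 0) cc).getD k []
        = pvCODES.map (fun code => pvColSum (cc.take k) code) := by
    intro k hk
    rw [pvPrefs_getD cc _ k hk, pvIter_zero]
  have hgetLo : PySem.List.pyGetD (List.replicate 6 0 :: pvPrefs (List.replicate 6 0) cc) i []
      = pvCODES.map (fun code => pvColSum (cc.take a) code) := by
    rw [show i = ((a : Nat) : Int) from by omega, PySem.List.pyGetD_natCast, hpref a ha]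
  have hgetHi : PySem.List.pyGetD (List.replicate 6 0 :: pvPrefs (List.replicate 6 0) cc) (i + w) []
      = pvCODES.map (fun code => pvColSum (cc.take b) code) := by
    rw [show i + w = ((b : Nat) : Int) from by omega, PySem.List.pyGetD_natCast, hpref b hb]
  have hrange : PySem.List.pyRange 0 6 1 = [0, 1, 2, 3, 4, 5] := by decide
  simp only [pvRowA, pvRowB, hrange, pvCODES, List.foldl_cons, List.foldl_nil]
  simp only [hcomb, hgetLo, hgetHi]
  simp only [pvCODES, List.map_cons, List.map_nil]
  simp [PySem.Dict.insert, PySem.Dict.contains,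
        PySem.List.pyGetD, PySem.List.pyGet?, PySem.List.pyIdx?]

-- ===== VERDICT (by name: the statement is the Claim_ definition above) =====
theorem sliding_window_counts_spec : Claim_equal_sliding_window_counts := by
  intro cc w _hdom hpre
  obtain ⟨hw, hnod⟩ := hpre
  unfold Spec_sliding_window_counts
  unfold sliding_window_counts sliding_window_counts_alt
  simp only [pvFold_prefix]
  rw [PySem.List.foldl_append_singleton_eq_map (f := fun i => pvRowA cc w i),
      PySem.List.foldl_append_singleton_eq_map (f := fun i => pvRowB _ w i)]
  simp only [List.nil_append]
  refine List.map_congr_left (fun i hi => ?_)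
  rw [PySem.List.mem_pyRange_one] at hi
  exact pvRow_eq cc w i hnod hw hi.1 (by omega)
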